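-- pv_equiv track=rewrite | github.com/NigrumAquila/py_checkio | storage/hexagon_spiral.py | hex_spiral
-- ===== SOURCE A (Python) =====
-- def hex_spiral(first, second):
--     DIRS = ((0, -1, 1), (-1, 0, 1), (-1, 1, 0), (0, 1, -1), (1, 0, -1), (1, -1, 0))
--     tiles = {1: (0, 0, 0), 2: (0, -1, 1)}
--     loc = (0, -1, 1)
--     lvl = 1
--     dir_index = 2
--     maxval = max(first, second)
--     for val in range(3, maxval+1):
--         nextloc = tuple(p+d for p, d in zip(loc, DIRS[dir_index]))
--         if sum(abs(p) for p in nextloc) != 2*lvl: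
--             dir_index = (dir_index+1) % len(DIRS)
--             turnloc = tuple(p+d for p, d in zip(loc, DIRS[dir_index]))
--             if turnloc in tiles.values():
--                 loc = nextloc
--                 lvl += 1
--             else:
--                 loc = turnloc
--         else:
--             loc = nextloc
--         tiles[val] = loc
--
--     return sum(abs(x-y) for x, y in zip(tiles[first], tiles[second])) // 2
-- ===== SOURCE B (Python) =====
-- def hex_spiral(first, second):
--     def coords(n):
--         if n == 1:
--             return (0, 0, 0)
--         k = 1
--         while n > 3*k*k + 3*k + 1:
--             k += 1
--         off = n - (3*k*k - 3*k + 2)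
--         if off < k:
--             return (k - 1 - off, -k, 1 + off)
--         t = off - (k - 1)
--         s, r0 = divmod(t - 1, k)
--         r = r0 + 1
--         if s == 0:
--             return (-r, -k + r, k)
--         if s == 1:
--             return (-k, r, k - r)
--         if s == 2:
--             return (-k + r, k, -r)
--         if s == 3:
--             return (r, k - r, -k)
--         return (k, -r, -k + r)
--     x1, y1, z1 = coords(first)
--     x2, y2, z2 = coords(second)
--     return (abs(x1 - x2) + abs(y1 - y2) + abs(z1 - z2)) // 2
-- ===== Notes on version B (the rewrite author's own statement) =====
-- stated objective: faster
-- what changed: B computes each tile's cube coordinates in closed form from its ring number (found by a short O(sqrt n) search) and offset, instead of A's step-by-step spiral simulation that scans all previously placed tiles at every corner.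
import Mathlib
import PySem

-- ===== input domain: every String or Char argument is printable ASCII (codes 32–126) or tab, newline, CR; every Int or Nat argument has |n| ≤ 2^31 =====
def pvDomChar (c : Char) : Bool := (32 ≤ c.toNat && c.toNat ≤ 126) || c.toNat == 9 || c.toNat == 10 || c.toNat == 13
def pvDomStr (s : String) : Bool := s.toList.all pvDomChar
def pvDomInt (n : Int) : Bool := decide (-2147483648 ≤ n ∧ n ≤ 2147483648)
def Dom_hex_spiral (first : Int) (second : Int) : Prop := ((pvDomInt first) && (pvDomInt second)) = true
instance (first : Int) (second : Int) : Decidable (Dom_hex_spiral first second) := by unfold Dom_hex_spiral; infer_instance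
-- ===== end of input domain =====

-- B replaces A's step-by-step spiral simulation (with its linear scan of all previously
-- placed tiles at every corner) by a closed-form computation of the cube coordinates of
-- each index from its ring number and offset; objective: faster (asymptotic).

-- ===== PORT A =====
def pvDirs : List (Int × Int × Int) :=
  [(0, -1, 1), (-1, 0, 1), (-1, 1, 0), (0, 1, -1), (1, 0, -1), (1, -1, 0)]

-- DIRS[dir_index]: dir_index is kept in [0, 6) by the `% 6`, so the list access never
-- raises; pyGetD with a dummy default is exact here.
def pvDir (i : Int) : Int × Int × Int := PySem.List.pyGetD pvDirs i (0, 0, 0)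

-- tuple(p+d for p, d in zip(loc, DIRS[...])) on 3-tuples
def pvAdd (p d : Int × Int × Int) : Int × Int × Int := (p.1 + d.1, p.2.1 + d.2.1, p.2.2 + d.2.2)

-- sum(abs(p) for p in loc) on a 3-tuple
def pvSumAbs (p : Int × Int × Int) : Int := |p.1| + |p.2.1| + |p.2.2|

-- one iteration of A's for-loop; state = (tiles, loc, lvl, dir_index)
def pvStepA (st : PySem.Dict Int (Int × Int × Int) × (Int × Int × Int) × Int × Int) (val : Int) :
    PySem.Dict Int (Int × Int × Int) × (Int × Int × Int) × Int × Int :=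
  let tiles := st.1
  let loc := st.2.1
  let lvl := st.2.2.1
  let dir_index := st.2.2.2
  let nextloc := pvAdd loc (pvDir dir_index)
  if pvSumAbs nextloc ≠ 2 * lvl then
    let dir_index' := PySem.Int.mod (dir_index + 1) 6
    let turnloc := pvAdd loc (pvDir dir_index')
    if turnloc ∈ PySem.Dict.values tiles then
      (tiles.insert val nextloc, nextloc, lvl + 1, dir_index')
    else
      (tiles.insert val turnloc, turnloc, lvl, dir_index')
  else
    (tiles.insert val nextloc, nextloc, lvl, dir_index)

def pvInit : PySem.Dict Int (Int × Int × Int) × (Int × Int × Int) × Int × Int :=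
  (PySem.Dict.ofList [((1 : Int), ((0 : Int), (0 : Int), (0 : Int))), (2, (0, -1, 1))],
    ((0 : Int), (-1 : Int), (1 : Int)), (1 : Int), (2 : Int))

def hex_spiral (first : Int) (second : Int) : Int :=
  let maxval := max first second
  let st := (PySem.List.pyRange 3 (maxval + 1) 1).foldl pvStepA pvInit
  let tiles := st.1
  -- tiles[first] / tiles[second] raise KeyError for arguments < 1; excluded by Pre_
  let a := (PySem.Dict.get? tiles first).getD (0, 0, 0)
  let b := (PySem.Dict.get? tiles second).getD (0, 0, 0)
  PySem.Int.floordiv (|a.1 - b.1| + |a.2.1 - b.2.1| + |a.2.2 - b.2.2|) 2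

-- ===== PORT B =====
-- Source B's `while n > 3*k*k+3*k+1: k += 1`, totalised with fuel; fuel n.toNat is always
-- enough since the answer k satisfies k ≤ n (the loop is otherwise a literal port).
def pvFindRing : Nat → Int → Int → Int
  | 0, _, k => k
  | fuel + 1, n, k => if 3 * k * k + 3 * k + 1 < n then pvFindRing fuel n (k + 1) else k

def pvCoords (n : Int) : Int × Int × Int :=
  if n = 1 then (0, 0, 0)
  else
    let k := pvFindRing n.toNat n 1
    let off := n - (3 * k * k - 3 * k + 2)
    if off < k then (k - 1 - off, -k, 1 + off)
    else
      let t := off - (k - 1)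
      let s := PySem.Int.floordiv (t - 1) k
      let r := PySem.Int.mod (t - 1) k + 1
      if s = 0 then (-r, -k + r, k)
      else if s = 1 then (-k, r, k - r)
      else if s = 2 then (-k + r, k, -r)
      else if s = 3 then (r, k - r, -k)
      else (k, -r, -k + r)

def hex_spiral_alt (first : Int) (second : Int) : Int :=
  let p := pvCoords first
  let q := pvCoords second
  PySem.Int.floordiv (|p.1 - q.1| + |p.2.1 - q.2.1| + |p.2.2 - q.2.2|) 2

-- ===== PRECONDITION & SPEC =====
-- A raises KeyError (tiles[first] / tiles[second]) when an argument is < 1.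
def Pre_hex_spiral (first : Int) (second : Int) : Prop := 1 ≤ first ∧ 1 ≤ second
instance (first : Int) (second : Int) : Decidable (Pre_hex_spiral first second) := by
  unfold Pre_hex_spiral; infer_instance

def pvWitness_hex_spiral : Int × Int := (3, 10)

def Spec_hex_spiral (first : Int) (second : Int) (out : Int) : Prop := out = hex_spiral_alt first second
instance (first : Int) (second : Int) (out : Int) : Decidable (Spec_hex_spiral first second out) := by
  unfold Spec_hex_spiral; infer_instance

-- ===== CLAIM (what is proved, stated in full; the proofs are below) =====
def Claim_equal_hex_spiral : Prop := ∀ (first : Int) (second : Int), Dom_hex_spiral first second → Pre_hex_spiral first second → Spec_hex_spiral first second (hex_spiral first second)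

-- ===== LEMMAS AND PROOFS =====

-- Ring k (k ≥ 1) of the spiral holds indices s k, …, s k + 6k - 1 where s k = 3k²-3k+2.
-- `pvPos k off` is the cube coordinate of the tile at offset `off` (0 ≤ off ≤ 6k-1) of ring k.
def pvPos (k off : Int) : Int × Int × Int :=
  if off < k then (k - 1 - off, -k, 1 + off)
  else if off < 2 * k then (-(off - k + 1), -k + (off - k + 1), k)
  else if off < 3 * k then (-k, off - 2 * k + 1, k - (off - 2 * k + 1))
  else if off < 4 * k then (-k + (off - 3 * k + 1), k, -(off - 3 * k + 1))
  else if off < 5 * k then (off - 4 * k + 1, k - (off - 4 * k + 1), -k)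
  else (k, -(off - 5 * k + 1), -k + (off - 5 * k + 1))

-- A's dir_index after placing the tile at ring k, offset off (tile 2 starts with 2).
def pvDirIdx (k off : Int) : Int :=
  if k = 1 ∧ off = 0 then 2
  else if off < k then 1
  else if off < 2 * k then 2
  else if off < 3 * k then 3
  else if off < 4 * k then 4
  else if off < 5 * k then 5
  else 0

-- A's tiles dict after the iteration for val = v: keys 1..v in order, values the coords.
def pvDict (v : Int) : PySem.Dict Int (Int × Int × Int) :=
  PySem.Dict.mk ((PySem.List.pyRange 1 (v + 1) 1).map (fun i => (i, pvCoords i)))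

-- A's full loop state after the iteration for val = 3k²-3k+2+off.
def pvSt (k off : Int) : PySem.Dict Int (Int × Int × Int) × (Int × Int × Int) × Int × Int :=
  (pvDict (3 * k * k - 3 * k + 2 + off), pvPos k off, k, pvDirIdx k off)

lemma pvFindRing_eq (fuel : Nat) (n k j : Int) (hj : 1 ≤ j) (hjk : j ≤ k)
    (hfuel : (k - j).toNat ≤ fuel)
    (hlo : 3 * k * k - 3 * k + 2 ≤ n) (hhi : n ≤ 3 * k * k + 3 * k + 1) :
    pvFindRing fuel n j = k := by
  induction fuel generalizing j with
  | zero => have : j = k := by omega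
            subst this; rfl
  | succ f ih =>
    rcases eq_or_lt_of_le hjk with he | hlt
    · subst he
      simp only [pvFindRing, if_neg (not_lt.mpr hhi)]
    · have hguard : 3 * j * j + 3 * j + 1 < n := by nlinarith
      simp only [pvFindRing, if_pos hguard]
      exact ih (j + 1) (by omega) (by omega) (by omega)

lemma pvCoords_eq (k off : Int) (hk : 1 ≤ k) (h0 : 0 ≤ off) (h6 : off ≤ 6 * k - 1) :
    pvCoords (3 * k * k - 3 * k + 2 + off) = pvPos k off := by
  set n := 3 * k * k - 3 * k + 2 + off with hn
  have hkk : 0 ≤ k * k - k := by nlinarith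
  have hn2 : 2 ≤ n := by rw [hn]; nlinarith
  have hkn : k ≤ n := by rw [hn]; nlinarith
  have hring : pvFindRing n.toNat n 1 = k :=
    pvFindRing_eq n.toNat n k 1 le_rfl hk (by omega) (by omega) (by omega)
  have hoff : n - (3 * k * k - 3 * k + 2) = off := by omega
  simp only [pvCoords, if_neg (show ¬ n = 1 by omega)]
  rw [hring, hoff]
  by_cases h1 : off < k
  · rw [if_pos h1]; unfold pvPos; rw [if_pos h1]
  · rw [if_neg h1]
    unfold pvPos
    rw [if_neg h1]
    have hkpos : (0:Int) < k := hk
    -- t - 1 = off - k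
    have ht : off - (k - 1) - 1 = off - k := by ring
    rw [ht]
    by_cases h2 : off < 2 * k
    · have hs : PySem.Int.floordiv (off - k) k = 0 := by
        rw [PySem.Int.floordiv_eq_iff_of_pos hkpos]; omega
      have hm : PySem.Int.mod (off - k) k = off - k := by
        have h := PySem.Int.floordiv_mul_add_mod (off - k) k
        rw [hs] at h
        omega
      rw [hs, hm, if_pos rfl, if_pos h2]
    · rw [if_neg h2]
      by_cases h3 : off < 3 * k
      · have hs : PySem.Int.floordiv (off - k) k = 1 := by
          rw [PySem.Int.floordiv_eq_iff_of_pos hkpos]; omega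
        have hm : PySem.Int.mod (off - k) k = off - 2 * k := by
          have h := PySem.Int.floordiv_mul_add_mod (off - k) k
          rw [hs] at h
          omega
        rw [hs, hm, if_neg (by norm_num), if_pos rfl, if_pos h3]
      · rw [if_neg h3]
        by_cases h4 : off < 4 * k
        · have hs : PySem.Int.floordiv (off - k) k = 2 := by
            rw [PySem.Int.floordiv_eq_iff_of_pos hkpos]; omega
          have hm : PySem.Int.mod (off - k) k = off - 3 * k := by
            have h := PySem.Int.floordiv_mul_add_mod (off - k) k
            rw [hs] at h
            omega
          rw [hs, hm, if_neg (by norm_num), if_neg (by norm_num), if_pos rfl, if_pos h4]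
        · rw [if_neg h4]
          by_cases h5 : off < 5 * k
          · have hs : PySem.Int.floordiv (off - k) k = 3 := by
              rw [PySem.Int.floordiv_eq_iff_of_pos hkpos]; omega
            have hm : PySem.Int.mod (off - k) k = off - 4 * k := by
              have h := PySem.Int.floordiv_mul_add_mod (off - k) k
              rw [hs] at h
              omega
            rw [hs, hm, if_neg (by norm_num), if_neg (by norm_num), if_neg (by norm_num), if_pos rfl, if_pos h5]
          · rw [if_neg h5]
            have hs : PySem.Int.floordiv (off - k) k = 4 := by
              rw [PySem.Int.floordiv_eq_iff_of_pos hkpos]; omega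
            have hm : PySem.Int.mod (off - k) k = off - 5 * k := by
              have h := PySem.Int.floordiv_mul_add_mod (off - k) k
              rw [hs] at h
              omega
            rw [hs, hm, if_neg (by norm_num), if_neg (by norm_num), if_neg (by norm_num), if_neg (by norm_num)]

lemma pvSumAbs_pvPos (k off : Int) (hk : 1 ≤ k) (h0 : 0 ≤ off) (h6 : off ≤ 6 * k - 1) :
    pvSumAbs (pvPos k off) = 2 * k := by
  unfold pvPos pvSumAbs
  split_ifs <;> simp only [Int.abs_eq_natAbs] <;> omega

lemma pvPos_inj (k off off' : Int) (hk : 1 ≤ k) (h0 : 0 ≤ off) (h6 : off ≤ 6 * k - 1)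
    (h0' : 0 ≤ off') (h6' : off' ≤ 6 * k - 1) (h : pvPos k off = pvPos k off') : off = off' := by
  unfold pvPos at h
  split_ifs at h <;> simp only [Prod.mk.injEq] at h <;> omega

lemma pvRing_lt (k k' off off' : Int) (hk : 1 ≤ k) (hkk : k < k')
    (h0 : 0 ≤ off) (h6 : off ≤ 6 * k - 1) (h0' : 0 ≤ off') :
    3 * k * k - 3 * k + 2 + off < 3 * k' * k' - 3 * k' + 2 + off' := by
  nlinarith [mul_nonneg (by omega : (0:Int) ≤ k' - k - 1) (by omega : (0:Int) ≤ k' + k)]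

lemma pvRep_exists (v : Int) (hv : 2 ≤ v) :
    ∃ k off, 1 ≤ k ∧ 0 ≤ off ∧ off ≤ 6 * k - 1 ∧ v = 3 * k * k - 3 * k + 2 + off := by
  have h : ∀ (n : Nat), ∃ k off, 1 ≤ k ∧ 0 ≤ off ∧ off ≤ 6 * k - 1 ∧ (n : Int) + 2 = 3 * k * k - 3 * k + 2 + off := by
    intro n
    induction n with
    | zero => exact ⟨1, 0, by norm_num⟩
    | succ m ih =>
      obtain ⟨k, off, hk, h0, h6, he⟩ := ih
      by_cases hoff : off < 6 * k - 1
      · exact ⟨k, off + 1, hk, by omega, by omega, by push_cast; linarith⟩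
      · refine ⟨k + 1, 0, by omega, le_refl _, by omega, ?_⟩
        have : 3 * (k + 1) * (k + 1) - 3 * (k + 1) + 2 = 3 * k * k - 3 * k + 2 + 6 * k := by ring
        push_cast
        linarith
  obtain ⟨k, off, hk, h0, h6, he⟩ := h (v - 2).toNat
  have hc : ((v - 2).toNat : Int) = v - 2 := Int.toNat_of_nonneg (by omega)
  rw [hc] at he
  exact ⟨k, off, hk, h0, h6, by linarith⟩

lemma pvDict_keys (v : Int) : PySem.Dict.keys (pvDict v) = PySem.List.pyRange 1 (v + 1) 1 := by
  unfold pvDict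
  simp only [PySem.Dict.keys, List.map_map]
  exact List.map_id' _

lemma pvDict_get? (v i : Int) (h1 : 1 ≤ i) (h2 : i ≤ v) :
    PySem.Dict.get? (pvDict v) i = some (pvCoords i) := by
  apply PySem.Dict.get?_of_mem_items
  · show (i, pvCoords i) ∈ (PySem.List.pyRange 1 (v + 1) 1).map (fun j => (j, pvCoords j))
    exact List.mem_map.mpr ⟨i, PySem.List.mem_pyRange_one.mpr ⟨h1, by omega⟩, rfl⟩
  · rw [pvDict_keys]
    exact PySem.List.nodup_pyRange_one 1 (v + 1)

lemma pvDict_values (v : Int) :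
    PySem.Dict.values (pvDict v) = (PySem.List.pyRange 1 (v + 1) 1).map pvCoords := by
  unfold pvDict
  simp [PySem.Dict.values, List.map_map, Function.comp]

lemma pvDict_insert (v : Int) (h : 1 ≤ v) :
    (pvDict v).insert (v + 1) (pvCoords (v + 1)) = pvDict (v + 1) := by
  have hc : (pvDict v).contains (v + 1) = false := by
    rw [PySem.Dict.contains_eq_decide_mem_keys, pvDict_keys]
    simp [PySem.List.mem_pyRange_one]
  apply PySem.Dict.ext
  rw [PySem.Dict.items_insert_of_not_contains (h := hc)]
  show PySem.Dict.items (pvDict v) ++ [((v + 1 : Int), pvCoords (v + 1))] = PySem.Dict.items (pvDict (v + 1))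
  unfold pvDict
  rw [PySem.List.pyRange_one_succ_right (show (1:Int) ≤ v + 1 by omega), List.map_append]
  rfl

lemma pvFresh (k off' v : Int) (hk : 1 ≤ k) (h0 : 0 ≤ off') (h6 : off' ≤ 6 * k - 1)
    (hv : v = 3 * k * k - 3 * k + 2 + off' - 1) :
    pvPos k off' ∉ PySem.Dict.values (pvDict v) := by
  subst hv
  rw [pvDict_values]
  intro hmem
  obtain ⟨i, hi, heq⟩ := List.mem_map.mp hmem
  rw [PySem.List.mem_pyRange_one] at hi
  have hkk : 0 ≤ k * k - k := by nlinarith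
  rcases eq_or_lt_of_le hi.1 with h1 | h2
  · -- i = 1: the centre tile, ring 0
    have hc : pvCoords 1 = ((0 : Int), (0 : Int), (0 : Int)) := by decide
    rw [← h1, hc] at heq
    have := pvSumAbs_pvPos k off' hk h0 h6
    rw [← heq] at this
    simp [pvSumAbs] at this
    omega
  · obtain ⟨ki, offi, hki, h0i, h6i, hei⟩ := pvRep_exists i (by omega)
    rw [hei, pvCoords_eq ki offi hki h0i h6i] at heq
    rcases lt_trichotomy ki k with hlt | hekk | hgt
    · have s1 := pvSumAbs_pvPos ki offi hki h0i h6i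
      have s2 := pvSumAbs_pvPos k off' hk h0 h6
      rw [heq, s2] at s1
      omega
    · subst hekk
      have := pvPos_inj ki offi off' hki h0i h6i h0 h6 heq
      omega
    · have := pvRing_lt k ki off' offi hk hgt h0 h6 h0i
      omega

lemma pvMemStart (k v : Int) (hk : 1 ≤ k) (hv : 3 * k * k - 3 * k + 2 ≤ v) :
    pvPos k 0 ∈ PySem.Dict.values (pvDict v) := by
  rw [pvDict_values]
  have hkk : 0 ≤ k * k - k := by nlinarith
  refine List.mem_map.mpr ⟨3 * k * k - 3 * k + 2, PySem.List.mem_pyRange_one.mpr ⟨by linarith, by linarith⟩, ?_⟩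
  have := pvCoords_eq k 0 hk le_rfl (by omega)
  simpa using this

lemma pvDir0 : pvDir 0 = (0, -1, 1) := by decide
lemma pvDir1 : pvDir 1 = (-1, 0, 1) := by decide
lemma pvDir2 : pvDir 2 = (-1, 1, 0) := by decide
lemma pvDir3 : pvDir 3 = (0, 1, -1) := by decide
lemma pvDir4 : pvDir 4 = (1, 0, -1) := by decide
lemma pvDir5 : pvDir 5 = (1, -1, 0) := by decide

lemma pvStepA_straight (tiles : PySem.Dict Int (Int × Int × Int)) (loc : Int × Int × Int)
    (lvl dir v : Int) (h : pvSumAbs (pvAdd loc (pvDir dir)) = 2 * lvl) :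
    pvStepA (tiles, loc, lvl, dir) v =
      (tiles.insert v (pvAdd loc (pvDir dir)), pvAdd loc (pvDir dir), lvl, dir) := by
  simp only [pvStepA]
  rw [if_neg (not_not_intro h)]

lemma pvStepA_turn_fresh (tiles : PySem.Dict Int (Int × Int × Int)) (loc : Int × Int × Int)
    (lvl dir v : Int) (h : pvSumAbs (pvAdd loc (pvDir dir)) ≠ 2 * lvl)
    (h2 : pvAdd loc (pvDir (PySem.Int.mod (dir + 1) 6)) ∉ PySem.Dict.values tiles) :
    pvStepA (tiles, loc, lvl, dir) v =
      (tiles.insert v (pvAdd loc (pvDir (PySem.Int.mod (dir + 1) 6))),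
        pvAdd loc (pvDir (PySem.Int.mod (dir + 1) 6)), lvl, PySem.Int.mod (dir + 1) 6) := by
  simp only [pvStepA]
  rw [if_pos h, if_neg h2]

lemma pvStepA_turn_occ (tiles : PySem.Dict Int (Int × Int × Int)) (loc : Int × Int × Int)
    (lvl dir v : Int) (h : pvSumAbs (pvAdd loc (pvDir dir)) ≠ 2 * lvl)
    (h2 : pvAdd loc (pvDir (PySem.Int.mod (dir + 1) 6)) ∈ PySem.Dict.values tiles) :
    pvStepA (tiles, loc, lvl, dir) v =
      (tiles.insert v (pvAdd loc (pvDir dir)), pvAdd loc (pvDir dir), lvl + 1,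
        PySem.Int.mod (dir + 1) 6) := by
  simp only [pvStepA]
  rw [if_pos h, if_pos h2]

lemma pvPos_br0 (k off : Int) (h : off < k) :
    pvPos k off = (k - 1 - off, -k, 1 + off) := by
  unfold pvPos; rw [if_pos h]

lemma pvPos_br1 (k off : Int) (h1 : k ≤ off) (h2 : off < 2 * k) :
    pvPos k off = (-(off - k + 1), -k + (off - k + 1), k) := by
  unfold pvPos; rw [if_neg (not_lt.mpr h1), if_pos h2]

lemma pvPos_br2 (k off : Int) (h1 : 2 * k ≤ off) (h2 : off < 3 * k) :
    pvPos k off = (-k, off - 2 * k + 1, k - (off - 2 * k + 1)) := by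
  unfold pvPos; rw [if_neg (by omega), if_neg (not_lt.mpr h1), if_pos h2]

lemma pvPos_br3 (k off : Int) (h1 : 3 * k ≤ off) (h2 : off < 4 * k) :
    pvPos k off = (-k + (off - 3 * k + 1), k, -(off - 3 * k + 1)) := by
  unfold pvPos; rw [if_neg (by omega), if_neg (by omega), if_neg (not_lt.mpr h1), if_pos h2]

lemma pvPos_br4 (k off : Int) (h1 : 4 * k ≤ off) (h2 : off < 5 * k) :
    pvPos k off = (off - 4 * k + 1, k - (off - 4 * k + 1), -k) := by
  unfold pvPos; rw [if_neg (by omega), if_neg (by omega), if_neg (by omega), if_neg (not_lt.mpr h1), if_pos h2]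

lemma pvPos_br5 (k off : Int) (h0 : 0 < k) (h1 : 5 * k ≤ off) :
    pvPos k off = (k, -(off - 5 * k + 1), -k + (off - 5 * k + 1)) := by
  unfold pvPos; rw [if_neg (by omega), if_neg (by omega), if_neg (by omega), if_neg (by omega), if_neg (not_lt.mpr h1)]

lemma pvDirIdx_br0 (k off : Int) (hno : ¬(k = 1 ∧ off = 0)) (h : off < k) :
    pvDirIdx k off = 1 := by
  unfold pvDirIdx; rw [if_neg hno, if_pos h]

lemma pvDirIdx_br1 (k off : Int) (hno : ¬(k = 1 ∧ off = 0)) (h1 : k ≤ off) (h2 : off < 2 * k) :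
    pvDirIdx k off = 2 := by
  unfold pvDirIdx; rw [if_neg hno, if_neg (not_lt.mpr h1), if_pos h2]

lemma pvDirIdx_br2 (k off : Int) (hno : ¬(k = 1 ∧ off = 0)) (h1 : 2 * k ≤ off) (h2 : off < 3 * k) :
    pvDirIdx k off = 3 := by
  unfold pvDirIdx; rw [if_neg hno, if_neg (by omega), if_neg (not_lt.mpr h1), if_pos h2]

lemma pvDirIdx_br3 (k off : Int) (hno : ¬(k = 1 ∧ off = 0)) (h1 : 3 * k ≤ off) (h2 : off < 4 * k) :
    pvDirIdx k off = 4 := by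
  unfold pvDirIdx; rw [if_neg hno, if_neg (by omega), if_neg (by omega), if_neg (not_lt.mpr h1), if_pos h2]

lemma pvDirIdx_br4 (k off : Int) (hno : ¬(k = 1 ∧ off = 0)) (h1 : 4 * k ≤ off) (h2 : off < 5 * k) :
    pvDirIdx k off = 5 := by
  unfold pvDirIdx; rw [if_neg hno, if_neg (by omega), if_neg (by omega), if_neg (by omega), if_neg (not_lt.mpr h1), if_pos h2]

lemma pvDirIdx_br5 (k off : Int) (hno : ¬(k = 1 ∧ off = 0)) (h0 : 0 < k) (h1 : 5 * k ≤ off) :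
    pvDirIdx k off = 0 := by
  unfold pvDirIdx; rw [if_neg hno, if_neg (by omega), if_neg (by omega), if_neg (by omega), if_neg (by omega), if_neg (not_lt.mpr h1)]

lemma pvStep_eq (k off : Int) (hk : 1 ≤ k) (h0 : 0 ≤ off) (h6 : off ≤ 6 * k - 1) :
    pvStepA (pvSt k off) (3 * k * k - 3 * k + 2 + off + 1) =
      if off < 6 * k - 1 then pvSt k (off + 1) else pvSt (k + 1) 0 := by
  have h3kk : 0 ≤ 3 * k * k - 3 * k := by nlinarith
  have e1 : 3 * k * k - 3 * k + 2 + (off + 1) = 3 * k * k - 3 * k + 2 + off + 1 := by ring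
  have hins := pvDict_insert (3 * k * k - 3 * k + 2 + off) (by omega)
  by_cases hk1 : k = 1 ∧ off = 0
  · obtain ⟨hka, hoffa⟩ := hk1
    subst hka; subst hoffa
    decide
  · have hno : ¬(k = 1 ∧ off = 0) := hk1
    by_cases hA : off + 1 < k
    · -- straight along the opening segment, dir 1
      have hdir := pvDirIdx_br0 k off hno (by omega)
      have hdir' := pvDirIdx_br0 k (off + 1) (by omega) (by omega)
      have hpos := pvPos_br0 k off (by omega)
      have hpos' := pvPos_br0 k (off + 1) (by omega)
      have hcoords := pvCoords_eq k (off + 1) hk (by omega) (by omega)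
      rw [e1] at hcoords
      have hnext : pvAdd ((k - 1 - off : Int), (-k : Int), (1 + off : Int)) (pvDir 1) = pvPos k (off + 1) := by
        rw [pvDir1, hpos']; simp only [pvAdd, Prod.mk.injEq]; omega
      have hsum : pvSumAbs (pvAdd ((k - 1 - off : Int), (-k : Int), (1 + off : Int)) (pvDir 1)) = 2 * k := by
        rw [pvDir1]; simp only [pvAdd, pvSumAbs, Int.abs_eq_natAbs]; omega
      rw [if_pos (by omega : off < 6 * k - 1)]
      simp only [pvSt]
      rw [e1, hdir, hpos]
      rw [pvStepA_straight _ _ _ _ _ hsum]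
      simp only [Prod.mk.injEq]
      refine ⟨by rw [hnext, ← hcoords]; exact hins, hnext, trivial, hdir'.symm⟩
    · by_cases hB1 : off + 1 = k
      · -- corner: turn dir 1 → 2
        have hdir := pvDirIdx_br0 k off hno (by omega)
        have hpos := pvPos_br0 k off (by omega)
        have hcoords := pvCoords_eq k (off + 1) hk (by omega) (by omega)
        rw [e1] at hcoords
        have hmod : PySem.Int.mod ((1 : Int) + 1) 6 = 2 := by decide
        have hturn : pvAdd ((k - 1 - off : Int), (-k : Int), (1 + off : Int)) (pvDir (PySem.Int.mod ((1 : Int) + 1) 6)) = pvPos k (off + 1) := by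
          rw [hmod, pvDir2, pvPos_br1 k (off + 1) (by omega) (by omega)]
          simp only [pvAdd, Prod.mk.injEq]; omega
        have hsum : pvSumAbs (pvAdd ((k - 1 - off : Int), (-k : Int), (1 + off : Int)) (pvDir 1)) ≠ 2 * k := by
          rw [pvDir1]; simp only [pvAdd, pvSumAbs, Int.abs_eq_natAbs]; omega
        have hfresh : pvAdd ((k - 1 - off : Int), (-k : Int), (1 + off : Int)) (pvDir (PySem.Int.mod ((1 : Int) + 1) 6)) ∉
            PySem.Dict.values (pvDict (3 * k * k - 3 * k + 2 + off)) := by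
          rw [hturn]
          exact pvFresh k (off + 1) (3 * k * k - 3 * k + 2 + off) hk (by omega) (by omega) (by omega)
        have hdir' := pvDirIdx_br1 k (off + 1) (by omega) (by omega) (by omega)
        rw [if_pos (by omega : off < 6 * k - 1)]
        simp only [pvSt]
        rw [e1, hdir, hpos]
        rw [pvStepA_turn_fresh _ _ _ _ _ hsum hfresh]
        simp only [Prod.mk.injEq]
        refine ⟨by rw [hturn, ← hcoords]; exact hins, hturn, trivial, by rw [hmod]; exact hdir'.symm⟩
      · by_cases hB2 : off + 1 < 2 * k
        · -- straight on side 0, dir 2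
          have hdir := pvDirIdx_br1 k off hno (by omega) (by omega)
          have hdir' := pvDirIdx_br1 k (off + 1) (by omega) (by omega) (by omega)
          have hpos := pvPos_br1 k off (by omega) (by omega)
          have hpos' := pvPos_br1 k (off + 1) (by omega) (by omega)
          have hcoords := pvCoords_eq k (off + 1) hk (by omega) (by omega)
          rw [e1] at hcoords
          have hnext : pvAdd ((-(off - k + 1) : Int), (-k + (off - k + 1) : Int), (k : Int)) (pvDir 2) = pvPos k (off + 1) := by
            rw [pvDir2, hpos']; simp only [pvAdd, Prod.mk.injEq]; omega
          have hsum : pvSumAbs (pvAdd ((-(off - k + 1) : Int), (-k + (off - k + 1) : Int), (k : Int)) (pvDir 2)) = 2 * k := by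
            rw [pvDir2]; simp only [pvAdd, pvSumAbs, Int.abs_eq_natAbs]; omega
          rw [if_pos (by omega : off < 6 * k - 1)]
          simp only [pvSt]
          rw [e1, hdir, hpos]
          rw [pvStepA_straight _ _ _ _ _ hsum]
          simp only [Prod.mk.injEq]
          refine ⟨by rw [hnext, ← hcoords]; exact hins, hnext, trivial, hdir'.symm⟩
        · by_cases hC : off + 1 = 2 * k
          · -- corner: turn dir 2 → 3
            have hdir := pvDirIdx_br1 k off hno (by omega) (by omega)
            have hpos := pvPos_br1 k off (by omega) (by omega)
            have hcoords := pvCoords_eq k (off + 1) hk (by omega) (by omega)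
            rw [e1] at hcoords
            have hmod : PySem.Int.mod ((2 : Int) + 1) 6 = 3 := by decide
            have hturn : pvAdd ((-(off - k + 1) : Int), (-k + (off - k + 1) : Int), (k : Int)) (pvDir (PySem.Int.mod ((2 : Int) + 1) 6)) = pvPos k (off + 1) := by
              rw [hmod, pvDir3, pvPos_br2 k (off + 1) (by omega) (by omega)]
              simp only [pvAdd, Prod.mk.injEq]; omega
            have hsum : pvSumAbs (pvAdd ((-(off - k + 1) : Int), (-k + (off - k + 1) : Int), (k : Int)) (pvDir 2)) ≠ 2 * k := by
              rw [pvDir2]; simp only [pvAdd, pvSumAbs, Int.abs_eq_natAbs]; omega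
            have hfresh : pvAdd ((-(off - k + 1) : Int), (-k + (off - k + 1) : Int), (k : Int)) (pvDir (PySem.Int.mod ((2 : Int) + 1) 6)) ∉
                PySem.Dict.values (pvDict (3 * k * k - 3 * k + 2 + off)) := by
              rw [hturn]
              exact pvFresh k (off + 1) (3 * k * k - 3 * k + 2 + off) hk (by omega) (by omega) (by omega)
            have hdir' := pvDirIdx_br2 k (off + 1) (by omega) (by omega) (by omega)
            rw [if_pos (by omega : off < 6 * k - 1)]
            simp only [pvSt]
            rw [e1, hdir, hpos]
            rw [pvStepA_turn_fresh _ _ _ _ _ hsum hfresh]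
            simp only [Prod.mk.injEq]
            refine ⟨by rw [hturn, ← hcoords]; exact hins, hturn, trivial, by rw [hmod]; exact hdir'.symm⟩
          · by_cases hD : off + 1 < 3 * k
            · -- straight on side 1, dir 3
              have hdir := pvDirIdx_br2 k off hno (by omega) (by omega)
              have hdir' := pvDirIdx_br2 k (off + 1) (by omega) (by omega) (by omega)
              have hpos := pvPos_br2 k off (by omega) (by omega)
              have hpos' := pvPos_br2 k (off + 1) (by omega) (by omega)
              have hcoords := pvCoords_eq k (off + 1) hk (by omega) (by omega)
              rw [e1] at hcoords
              have hnext : pvAdd ((-k : Int), (off - 2 * k + 1 : Int), (k - (off - 2 * k + 1) : Int)) (pvDir 3) = pvPos k (off + 1) := by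
                rw [pvDir3, hpos']; simp only [pvAdd, Prod.mk.injEq]; omega
              have hsum : pvSumAbs (pvAdd ((-k : Int), (off - 2 * k + 1 : Int), (k - (off - 2 * k + 1) : Int)) (pvDir 3)) = 2 * k := by
                rw [pvDir3]; simp only [pvAdd, pvSumAbs, Int.abs_eq_natAbs]; omega
              rw [if_pos (by omega : off < 6 * k - 1)]
              simp only [pvSt]
              rw [e1, hdir, hpos]
              rw [pvStepA_straight _ _ _ _ _ hsum]
              simp only [Prod.mk.injEq]
              refine ⟨by rw [hnext, ← hcoords]; exact hins, hnext, trivial, hdir'.symm⟩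
            · by_cases hE : off + 1 = 3 * k
              · -- corner: turn dir 3 → 4
                have hdir := pvDirIdx_br2 k off hno (by omega) (by omega)
                have hpos := pvPos_br2 k off (by omega) (by omega)
                have hcoords := pvCoords_eq k (off + 1) hk (by omega) (by omega)
                rw [e1] at hcoords
                have hmod : PySem.Int.mod ((3 : Int) + 1) 6 = 4 := by decide
                have hturn : pvAdd ((-k : Int), (off - 2 * k + 1 : Int), (k - (off - 2 * k + 1) : Int)) (pvDir (PySem.Int.mod ((3 : Int) + 1) 6)) = pvPos k (off + 1) := by
                  rw [hmod, pvDir4, pvPos_br3 k (off + 1) (by omega) (by omega)]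
                  simp only [pvAdd, Prod.mk.injEq]; omega
                have hsum : pvSumAbs (pvAdd ((-k : Int), (off - 2 * k + 1 : Int), (k - (off - 2 * k + 1) : Int)) (pvDir 3)) ≠ 2 * k := by
                  rw [pvDir3]; simp only [pvAdd, pvSumAbs, Int.abs_eq_natAbs]; omega
                have hfresh : pvAdd ((-k : Int), (off - 2 * k + 1 : Int), (k - (off - 2 * k + 1) : Int)) (pvDir (PySem.Int.mod ((3 : Int) + 1) 6)) ∉
                    PySem.Dict.values (pvDict (3 * k * k - 3 * k + 2 + off)) := by
                  rw [hturn]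
                  exact pvFresh k (off + 1) (3 * k * k - 3 * k + 2 + off) hk (by omega) (by omega) (by omega)
                have hdir' := pvDirIdx_br3 k (off + 1) (by omega) (by omega) (by omega)
                rw [if_pos (by omega : off < 6 * k - 1)]
                simp only [pvSt]
                rw [e1, hdir, hpos]
                rw [pvStepA_turn_fresh _ _ _ _ _ hsum hfresh]
                simp only [Prod.mk.injEq]
                refine ⟨by rw [hturn, ← hcoords]; exact hins, hturn, trivial, by rw [hmod]; exact hdir'.symm⟩
              · by_cases hF : off + 1 < 4 * k
                · -- straight on side 2, dir 4
                  have hdir := pvDirIdx_br3 k off hno (by omega) (by omega)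
                  have hdir' := pvDirIdx_br3 k (off + 1) (by omega) (by omega) (by omega)
                  have hpos := pvPos_br3 k off (by omega) (by omega)
                  have hpos' := pvPos_br3 k (off + 1) (by omega) (by omega)
                  have hcoords := pvCoords_eq k (off + 1) hk (by omega) (by omega)
                  rw [e1] at hcoords
                  have hnext : pvAdd ((-k + (off - 3 * k + 1) : Int), (k : Int), (-(off - 3 * k + 1) : Int)) (pvDir 4) = pvPos k (off + 1) := by
                    rw [pvDir4, hpos']; simp only [pvAdd, Prod.mk.injEq]; omega
                  have hsum : pvSumAbs (pvAdd ((-k + (off - 3 * k + 1) : Int), (k : Int), (-(off - 3 * k + 1) : Int)) (pvDir 4)) = 2 * k := by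
                    rw [pvDir4]; simp only [pvAdd, pvSumAbs, Int.abs_eq_natAbs]; omega
                  rw [if_pos (by omega : off < 6 * k - 1)]
                  simp only [pvSt]
                  rw [e1, hdir, hpos]
                  rw [pvStepA_straight _ _ _ _ _ hsum]
                  simp only [Prod.mk.injEq]
                  refine ⟨by rw [hnext, ← hcoords]; exact hins, hnext, trivial, hdir'.symm⟩
                · by_cases hG : off + 1 = 4 * k
                  · -- corner: turn dir 4 → 5
                    have hdir := pvDirIdx_br3 k off hno (by omega) (by omega)
                    have hpos := pvPos_br3 k off (by omega) (by omega)
                    have hcoords := pvCoords_eq k (off + 1) hk (by omega) (by omega)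
                    rw [e1] at hcoords
                    have hmod : PySem.Int.mod ((4 : Int) + 1) 6 = 5 := by decide
                    have hturn : pvAdd ((-k + (off - 3 * k + 1) : Int), (k : Int), (-(off - 3 * k + 1) : Int)) (pvDir (PySem.Int.mod ((4 : Int) + 1) 6)) = pvPos k (off + 1) := by
                      rw [hmod, pvDir5, pvPos_br4 k (off + 1) (by omega) (by omega)]
                      simp only [pvAdd, Prod.mk.injEq]; omega
                    have hsum : pvSumAbs (pvAdd ((-k + (off - 3 * k + 1) : Int), (k : Int), (-(off - 3 * k + 1) : Int)) (pvDir 4)) ≠ 2 * k := by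
                      rw [pvDir4]; simp only [pvAdd, pvSumAbs, Int.abs_eq_natAbs]; omega
                    have hfresh : pvAdd ((-k + (off - 3 * k + 1) : Int), (k : Int), (-(off - 3 * k + 1) : Int)) (pvDir (PySem.Int.mod ((4 : Int) + 1) 6)) ∉
                        PySem.Dict.values (pvDict (3 * k * k - 3 * k + 2 + off)) := by
                      rw [hturn]
                      exact pvFresh k (off + 1) (3 * k * k - 3 * k + 2 + off) hk (by omega) (by omega) (by omega)
                    have hdir' := pvDirIdx_br4 k (off + 1) (by omega) (by omega) (by omega)
                    rw [if_pos (by omega : off < 6 * k - 1)]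
                    simp only [pvSt]
                    rw [e1, hdir, hpos]
                    rw [pvStepA_turn_fresh _ _ _ _ _ hsum hfresh]
                    simp only [Prod.mk.injEq]
                    refine ⟨by rw [hturn, ← hcoords]; exact hins, hturn, trivial, by rw [hmod]; exact hdir'.symm⟩
                  · by_cases hH : off + 1 < 5 * k
                    · -- straight on side 3, dir 5
                      have hdir := pvDirIdx_br4 k off hno (by omega) (by omega)
                      have hdir' := pvDirIdx_br4 k (off + 1) (by omega) (by omega) (by omega)
                      have hpos := pvPos_br4 k off (by omega) (by omega)
                      have hpos' := pvPos_br4 k (off + 1) (by omega) (by omega)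
                      have hcoords := pvCoords_eq k (off + 1) hk (by omega) (by omega)
                      rw [e1] at hcoords
                      have hnext : pvAdd ((off - 4 * k + 1 : Int), (k - (off - 4 * k + 1) : Int), (-k : Int)) (pvDir 5) = pvPos k (off + 1) := by
                        rw [pvDir5, hpos']; simp only [pvAdd, Prod.mk.injEq]; omega
                      have hsum : pvSumAbs (pvAdd ((off - 4 * k + 1 : Int), (k - (off - 4 * k + 1) : Int), (-k : Int)) (pvDir 5)) = 2 * k := by
                        rw [pvDir5]; simp only [pvAdd, pvSumAbs, Int.abs_eq_natAbs]; omega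
                      rw [if_pos (by omega : off < 6 * k - 1)]
                      simp only [pvSt]
                      rw [e1, hdir, hpos]
                      rw [pvStepA_straight _ _ _ _ _ hsum]
                      simp only [Prod.mk.injEq]
                      refine ⟨by rw [hnext, ← hcoords]; exact hins, hnext, trivial, hdir'.symm⟩
                    · by_cases hI : off + 1 = 5 * k
                      · -- corner: turn dir 5 → 0
                        have hdir := pvDirIdx_br4 k off hno (by omega) (by omega)
                        have hpos := pvPos_br4 k off (by omega) (by omega)
                        have hcoords := pvCoords_eq k (off + 1) hk (by omega) (by omega)
                        rw [e1] at hcoords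
                        have hmod : PySem.Int.mod ((5 : Int) + 1) 6 = 0 := by decide
                        have hturn : pvAdd ((off - 4 * k + 1 : Int), (k - (off - 4 * k + 1) : Int), (-k : Int)) (pvDir (PySem.Int.mod ((5 : Int) + 1) 6)) = pvPos k (off + 1) := by
                          rw [hmod, pvDir0, pvPos_br5 k (off + 1) (by omega) (by omega)]
                          simp only [pvAdd, Prod.mk.injEq]; omega
                        have hsum : pvSumAbs (pvAdd ((off - 4 * k + 1 : Int), (k - (off - 4 * k + 1) : Int), (-k : Int)) (pvDir 5)) ≠ 2 * k := by
                          rw [pvDir5]; simp only [pvAdd, pvSumAbs, Int.abs_eq_natAbs]; omega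
                        have hfresh : pvAdd ((off - 4 * k + 1 : Int), (k - (off - 4 * k + 1) : Int), (-k : Int)) (pvDir (PySem.Int.mod ((5 : Int) + 1) 6)) ∉
                            PySem.Dict.values (pvDict (3 * k * k - 3 * k + 2 + off)) := by
                          rw [hturn]
                          exact pvFresh k (off + 1) (3 * k * k - 3 * k + 2 + off) hk (by omega) (by omega) (by omega)
                        have hdir' := pvDirIdx_br5 k (off + 1) (by omega) (by omega) (by omega)
                        rw [if_pos (by omega : off < 6 * k - 1)]
                        simp only [pvSt]
                        rw [e1, hdir, hpos]
                        rw [pvStepA_turn_fresh _ _ _ _ _ hsum hfresh]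
                        simp only [Prod.mk.injEq]
                        refine ⟨by rw [hturn, ← hcoords]; exact hins, hturn, trivial, by rw [hmod]; exact hdir'.symm⟩
                      · by_cases hK : off = 6 * k - 1
                        · -- last tile of ring k: step out to ring k + 1
                          have hdir := pvDirIdx_br5 k off hno (by omega) (by omega)
                          have hpos := pvPos_br5 k off (by omega) (by omega)
                          have e2 : 3 * (k + 1) * (k + 1) - 3 * (k + 1) + 2 + 0 = 3 * k * k - 3 * k + 2 + off + 1 := by
                            rw [hK]; ring
                          have hcoords2 : pvCoords (3 * k * k - 3 * k + 2 + off + 1) = pvPos (k + 1) 0 := by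
                            have h := pvCoords_eq (k + 1) 0 (by omega) le_rfl (by omega)
                            rw [e2] at h; exact h
                          have hmod : PySem.Int.mod ((0 : Int) + 1) 6 = 1 := by decide
                          have hnext : pvAdd ((k : Int), (-(off - 5 * k + 1) : Int), (-k + (off - 5 * k + 1) : Int)) (pvDir 0) = pvPos (k + 1) 0 := by
                            rw [pvDir0, pvPos_br0 (k + 1) 0 (by omega)]
                            simp only [pvAdd, Prod.mk.injEq]; omega
                          have hsum : pvSumAbs (pvAdd ((k : Int), (-(off - 5 * k + 1) : Int), (-k + (off - 5 * k + 1) : Int)) (pvDir 0)) ≠ 2 * k := by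
                            rw [pvDir0]; simp only [pvAdd, pvSumAbs, Int.abs_eq_natAbs]; omega
                          have hocc : pvAdd ((k : Int), (-(off - 5 * k + 1) : Int), (-k + (off - 5 * k + 1) : Int)) (pvDir (PySem.Int.mod ((0 : Int) + 1) 6)) ∈
                              PySem.Dict.values (pvDict (3 * k * k - 3 * k + 2 + off)) := by
                            have hob : pvAdd ((k : Int), (-(off - 5 * k + 1) : Int), (-k + (off - 5 * k + 1) : Int)) (pvDir (PySem.Int.mod ((0 : Int) + 1) 6)) = pvPos k 0 := by
                              rw [hmod, pvDir1, pvPos_br0 k 0 (by omega)]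
                              simp only [pvAdd, Prod.mk.injEq]; omega
                            rw [hob]
                            exact pvMemStart k (3 * k * k - 3 * k + 2 + off) hk (by omega)
                          have hdir' := pvDirIdx_br0 (k + 1) 0 (by omega) (by omega)
                          rw [if_neg (by omega : ¬ off < 6 * k - 1)]
                          simp only [pvSt]
                          rw [e2, hdir, hpos]
                          rw [pvStepA_turn_occ _ _ _ _ _ hsum hocc]
                          simp only [Prod.mk.injEq]
                          refine ⟨by rw [hnext, ← hcoords2]; exact hins, hnext, trivial, by rw [hmod]; exact hdir'.symm⟩
                        · -- straight on side 4, dir 0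
                          have hdir := pvDirIdx_br5 k off hno (by omega) (by omega)
                          have hdir' := pvDirIdx_br5 k (off + 1) (by omega) (by omega) (by omega)
                          have hpos := pvPos_br5 k off (by omega) (by omega)
                          have hpos' := pvPos_br5 k (off + 1) (by omega) (by omega)
                          have hcoords := pvCoords_eq k (off + 1) hk (by omega) (by omega)
                          rw [e1] at hcoords
                          have hnext : pvAdd ((k : Int), (-(off - 5 * k + 1) : Int), (-k + (off - 5 * k + 1) : Int)) (pvDir 0) = pvPos k (off + 1) := by
                            rw [pvDir0, hpos']; simp only [pvAdd, Prod.mk.injEq]; omega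
                          have hsum : pvSumAbs (pvAdd ((k : Int), (-(off - 5 * k + 1) : Int), (-k + (off - 5 * k + 1) : Int)) (pvDir 0)) = 2 * k := by
                            rw [pvDir0]; simp only [pvAdd, pvSumAbs, Int.abs_eq_natAbs]; omega
                          rw [if_pos (by omega : off < 6 * k - 1)]
                          simp only [pvSt]
                          rw [e1, hdir, hpos]
                          rw [pvStepA_straight _ _ _ _ _ hsum]
                          simp only [Prod.mk.injEq]
                          refine ⟨by rw [hnext, ← hcoords]; exact hins, hnext, trivial, hdir'.symm⟩

lemma pvFold_eq (n : Nat) : ∀ (k off : Int), 1 ≤ k → 0 ≤ off → off ≤ 6 * k - 1 →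
    3 * k * k - 3 * k + 2 + off = (n : Int) + 2 →
    (PySem.List.pyRange 3 ((n : Int) + 3) 1).foldl pvStepA pvInit = pvSt k off := by
  induction n with
  | zero =>
    intro k off hk h0 h6 hyp
    push_cast at hyp
    have hk1 : k = 1 := by
      by_contra hne
      have := pvRing_lt 1 k 0 off (by norm_num) (by omega) (by norm_num) (by norm_num) h0
      omega
    subst hk1
    have hoff0 : off = 0 := by omega
    subst hoff0
    rw [show ((0 : Nat) : Int) + 3 = 3 by norm_num, PySem.List.pyRange_one_eq_nil (le_refl 3)]
    decide
  | succ m ih =>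
    intro k off hk h0 h6 hyp
    push_cast at hyp
    have hcast : ((m + 1 : Nat) : Int) + 3 = ((m : Int) + 3) + 1 := by push_cast; ring
    rw [hcast, PySem.List.pyRange_one_succ_right (by omega : (3 : Int) ≤ (m : Int) + 3),
      List.foldl_append, List.foldl_cons, List.foldl_nil]
    by_cases hoffpos : 1 ≤ off
    · rw [ih k (off - 1) hk (by omega) (by omega) (by omega)]
      have hstep := pvStep_eq k (off - 1) hk (by omega) (by omega)
      rw [if_pos (by omega : off - 1 < 6 * k - 1), show off - 1 + 1 = off by omega] at hstep
      rw [show (m : Int) + 3 = 3 * k * k - 3 * k + 2 + (off - 1) + 1 by omega]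
      exact hstep
    · have hoff0 : off = 0 := by omega
      subst hoff0
      have hk2 : 2 ≤ k := by
        by_contra hlt
        have hk1 : k = 1 := by omega
        subst hk1
        omega
      have hpred : 3 * (k - 1) * (k - 1) - 3 * (k - 1) + 2 + (6 * (k - 1) - 1) = (m : Int) + 2 := by
        have e : 3 * (k - 1) * (k - 1) - 3 * (k - 1) + 2 + (6 * (k - 1) - 1) = 3 * k * k - 3 * k + 1 := by
          ring
        rw [e]; omega
      rw [ih (k - 1) (6 * (k - 1) - 1) (by omega) (by omega) (by omega) hpred]
      have hstep := pvStep_eq (k - 1) (6 * (k - 1) - 1) (by omega) (by omega) (by omega)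
      rw [if_neg (by omega), show k - 1 + 1 = k by omega] at hstep
      rw [show (m : Int) + 3 = 3 * (k - 1) * (k - 1) - 3 * (k - 1) + 2 + (6 * (k - 1) - 1) + 1 by omega]
      exact hstep

-- ===== VERDICT (by name: the statement is the Claim_ definition above) =====
theorem hex_spiral_spec : Claim_equal_hex_spiral := by
  unfold Claim_equal_hex_spiral Spec_hex_spiral
  intro f s _ hpre
  obtain ⟨hf, hs⟩ := hpre
  have hfm : f ≤ max f s := le_max_left f s
  have hsm : s ≤ max f s := le_max_right f s
  have hm1 : 1 ≤ max f s := le_trans hf hfm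
  have hv2 : (2 : Int) ≤ max (max f s) 2 := le_max_right _ _
  have hmv : max f s ≤ max (max f s) 2 := le_max_left _ _
  obtain ⟨k, off, hk, h0, h6, hrep⟩ := pvRep_exists (max (max f s) 2) hv2
  have hfold := pvFold_eq (max (max f s) 2 - 2).toNat k off hk h0 h6
    (by rw [Int.toNat_of_nonneg (by omega)]; omega)
  rw [Int.toNat_of_nonneg (by omega), show max (max f s) 2 - 2 + 3 = max (max f s) 2 + 1 by ring]
    at hfold
  have hrange : PySem.List.pyRange 3 (max f s + 1) 1 = PySem.List.pyRange 3 (max (max f s) 2 + 1) 1 := by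
    by_cases h : (2 : Int) ≤ max f s
    · rw [max_eq_left h]
    · have h1 : max f s = 1 := by omega
      rw [h1, show max (1 : Int) 2 = 2 by norm_num,
        PySem.List.pyRange_one_eq_nil (by norm_num : (1 : Int) + 1 ≤ 3),
        PySem.List.pyRange_one_eq_nil (by norm_num : (2 : Int) + 1 ≤ 3)]
  simp only [hex_spiral, hex_spiral_alt]
  rw [hrange, hfold]
  simp only [pvSt]
  rw [pvDict_get? _ f hf (by omega), pvDict_get? _ s hs (by omega)]
  simp only [Option.getD_some]
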